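-- pv_equiv track=rewrite | github.com/RiviqVH/Advent-Of-Code-2022 | Day 07/day7.py | total_dir_sizes
-- ===== SOURCE A (Python) =====
-- def total_dir_sizes(fs):
--     sizes = {}
--     for l in fs:
--         total_size = 0
--         subdirs = {x: fs[x] for x in fs if l in x}
--         for d in subdirs:
--             total_size += sum(subdirs[d].values())
--         sizes[l] = total_size
--     return(sizes)
-- ===== SOURCE B (Python) =====
-- def total_dir_sizes(fs):
--     # Scatter: each directory's own file total is added once to every key that
--     # occurs as a substring of its name, found via hash lookup among the
--     # enumerated distinct substrings (no pairwise key-vs-key substring scan).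
--     sizes = dict.fromkeys(fs, 0)
--     for x, files in fs.items():
--         t = sum(files.values())
--         n = len(x)
--         for s in dict.fromkeys(x[i:j] for i in range(n + 1) for j in range(i, n + 1)):
--             if s in sizes:
--                 sizes[s] += t
--     return sizes
-- ===== Notes on version B (the rewrite author's own statement) =====
-- stated objective: faster
-- what changed: B inverts A's gather into a scatter: it enumerates each directory name's distinct substrings once and adds that directory's file total to every enumerated substring that is a key (hash lookup), replacing A's per-key pairwise key-in-key substring scan and per-key re-summing of matched file values; cost becomes linear in the number of directories.
import Mathlib
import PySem

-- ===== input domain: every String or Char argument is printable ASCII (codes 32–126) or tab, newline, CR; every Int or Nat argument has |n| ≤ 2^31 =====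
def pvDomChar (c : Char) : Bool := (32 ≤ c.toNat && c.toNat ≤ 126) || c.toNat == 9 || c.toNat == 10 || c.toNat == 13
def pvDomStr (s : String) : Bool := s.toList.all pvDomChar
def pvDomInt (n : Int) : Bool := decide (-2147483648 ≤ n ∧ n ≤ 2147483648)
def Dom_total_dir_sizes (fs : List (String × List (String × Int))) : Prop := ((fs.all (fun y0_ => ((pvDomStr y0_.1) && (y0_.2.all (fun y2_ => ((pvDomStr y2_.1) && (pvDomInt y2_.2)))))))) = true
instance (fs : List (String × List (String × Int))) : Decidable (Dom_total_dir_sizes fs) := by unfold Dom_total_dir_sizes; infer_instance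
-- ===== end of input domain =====

-- B scatters each directory's own file total to the keys found among its enumerated
-- distinct substrings via hash lookup, instead of A's gather with a pairwise
-- key-in-key substring scan (measurably faster on inputs with many directories).

-- ===== PORT A =====
def total_dir_sizes (fs : List (String × List (String × Int))) : List (String × Int) :=
  let d : PySem.Dict String (List (String × Int)) := PySem.Dict.ofList fs
  (d.keys.foldl (fun sizes l =>
      let subdirs : PySem.Dict String (PySem.Dict String Int) :=
        d.keys.foldl (fun sd x =>
            if PySem.Str.isIn l x then sd.insert x (PySem.Dict.ofList (d.getD x [])) else sd)
          PySem.Dict.empty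
      let total_size : Int :=
        subdirs.keys.foldl (fun t dk => t + (subdirs.getD dk PySem.Dict.empty).values.sum) 0
      sizes.insert l total_size)
    (PySem.Dict.empty : PySem.Dict String Int)).items

-- ===== PORT B =====
-- all substrings x[i:j] of x, in generation order (the inner generator of Source B)
def pvSubsGen (x : String) : List String :=
  (PySem.List.pyRange 0 (PySem.Str.len x + 1)).flatMap (fun i =>
    (PySem.List.pyRange i (PySem.Str.len x + 1)).map (fun j =>
      PySem.Str.slice x (some i) (some j)))

def total_dir_sizes_alt (fs : List (String × List (String × Int))) : List (String × Int) :=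
  let d : PySem.Dict String (List (String × Int)) := PySem.Dict.ofList fs
  let sizes0 : PySem.Dict String Int :=
    d.keys.foldl (fun sz l => sz.insert l 0) PySem.Dict.empty
  (d.items.foldl (fun sz p =>
      let t : Int := (PySem.Dict.ofList p.2).values.sum
      (PySem.List.dedup (pvSubsGen p.1)).foldl
        (fun sz s => if sz.contains s then sz.modify s 0 (· + t) else sz) sz)
    sizes0).items

-- ===== PRECONDITION & SPEC =====
def Spec_total_dir_sizes (fs : List (String × List (String × Int))) (out : List (String × Int)) : Prop := out = total_dir_sizes_alt fs
instance (fs : List (String × List (String × Int))) (out : List (String × Int)) : Decidable (Spec_total_dir_sizes fs out) := by unfold Spec_total_dir_sizes; infer_instance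

-- ===== CLAIM (what is proved, stated in full; the proofs are below) =====
def Claim_equal_total_dir_sizes : Prop := ∀ (fs : List (String × List (String × Int))), Dom_total_dir_sizes fs → Spec_total_dir_sizes fs (total_dir_sizes fs)

-- ===== LEMMAS AND PROOFS =====

-- A's per-directory total, as the closed term the port computes for one outer key l
def pvTA (fs : List (String × List (String × Int))) (l : String) : Int :=
  (fun (subdirs : PySem.Dict String (PySem.Dict String Int)) =>
      subdirs.keys.foldl (fun t dk => t + (subdirs.getD dk PySem.Dict.empty).values.sum) 0)
    ((PySem.Dict.ofList fs).keys.foldl (fun sd x =>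
        if PySem.Str.isIn l x then
          sd.insert x (PySem.Dict.ofList ((PySem.Dict.ofList fs).getD x [])) else sd)
      PySem.Dict.empty)

-- a fold that inserts only when the guard holds is the plain insert-fold over the filtered list
theorem foldl_insert_if_eq_filter {κ ν α : Type} [BEq κ]
    (xs : List α) (c : α → Bool) (k : α → κ) (v : α → ν) (sd : PySem.Dict κ ν) :
    xs.foldl (fun sd x => if c x then sd.insert (k x) (v x) else sd) sd
      = (xs.filter c).foldl (fun sd x => sd.insert (k x) (v x)) sd := by
  induction xs generalizing sd with
  | nil => rfl
  | cons a t ih =>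
    simp only [List.foldl_cons, List.filter_cons]
    by_cases h : c a = true
    · simp [h, ih]
    · simp [h, ih]

-- A's per-key total equals the sum of the precomputed per-directory totals over matching keys
theorem keyTotal_eq (d : PySem.Dict String (List (String × Int))) (hnd : d.keys.Nodup) (l : String) :
    (fun subdirs => subdirs.keys.foldl (fun t dk => t + (subdirs.getD dk PySem.Dict.empty).values.sum) 0)
      (d.keys.foldl (fun sd x => if PySem.Str.isIn l x then sd.insert x (PySem.Dict.ofList (d.getD x [])) else sd)
        (PySem.Dict.empty : PySem.Dict String (PySem.Dict String Int)))
    = (((d.items.map (fun p => (p.1, (PySem.Dict.ofList p.2).values.sum))).filter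
          (fun q => PySem.Str.isIn l q.1)).map (·.2)).sum := by
  simp only
  rw [foldl_insert_if_eq_filter d.keys (fun x => PySem.Str.isIn l x) (fun x => x)
        (fun x => PySem.Dict.ofList (d.getD x [])) PySem.Dict.empty]
  set ks := d.keys.filter (fun x => PySem.Str.isIn l x) with hks
  have hksnd : ks.Nodup := hnd.filter _
  have hitems := PySem.Dict.items_foldl_insert_fresh ks (fun (x : String) => x)
      (fun x => PySem.Dict.ofList (d.getD x [])) PySem.Dict.empty
      (by intro a _; simp) (by simpa using hksnd)
  set sub := ks.foldl (fun sd x => sd.insert x (PySem.Dict.ofList (d.getD x []))) PySem.Dict.empty with hsub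
  have hempty : (PySem.Dict.empty : PySem.Dict String (PySem.Dict String Int)).items = [] := rfl
  have hitems' : sub.items = ks.map (fun a => (a, PySem.Dict.ofList (d.getD a []))) := by
    rw [hitems, hempty, List.nil_append]
  have hkeys : sub.keys = ks := by
    show sub.items.map (·.1) = ks
    rw [hitems', List.map_map]
    exact List.map_id ks
  have hsubnd : sub.keys.Nodup := hkeys ▸ hksnd
  have hget : ∀ x ∈ ks, sub.getD x PySem.Dict.empty = PySem.Dict.ofList (d.getD x []) := by
    intro x hx
    refine PySem.Dict.getD_of_mem_items sub ?_ hsubnd _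
    rw [hitems']
    exact List.mem_map_of_mem hx
  rw [hkeys, PySem.List.foldl_congr_mem ks _
        (fun t dk => t + (PySem.Dict.ofList (d.getD dk [])).values.sum) 0
        (by intro acc x hx; rw [hget x hx]),
      PySem.List.foldl_add]
  rw [PySem.Dict.items_eq_map_keys d hnd []]
  simp only [List.filter_map, List.map_map, zero_add]
  rfl

-- Port A written with the per-key total factored out (definitional)
theorem A_as_map (fs : List (String × List (String × Int))) :
    total_dir_sizes fs = (PySem.Dict.ofList fs).keys.map (fun l => (l, pvTA fs l)) := by
  have h0 : total_dir_sizes fs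
      = ((PySem.Dict.ofList fs).keys.foldl
          (fun sizes l => sizes.insert l (pvTA fs l)) PySem.Dict.empty).items := rfl
  have hnd := PySem.Dict.nodup_keys_ofList fs
  have hemp : (PySem.Dict.empty : PySem.Dict String Int).items = [] := rfl
  have := PySem.Dict.items_foldl_insert_fresh (PySem.Dict.ofList fs).keys
      (fun (x : String) => x) (fun l => pvTA fs l) PySem.Dict.empty
      (by intro a _; simp) (by rw [List.map_id_fun']; exact hnd)
  rw [h0, this, hemp, List.nil_append]

-- membership in the generated substring list IS Python's 'l in x'
theorem mem_pvSubsGen (x l : String) :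
    l ∈ pvSubsGen x ↔ PySem.Str.isIn l x = true := by
  simp only [pvSubsGen, List.mem_flatMap, List.mem_map, PySem.List.mem_pyRange_one,
    PySem.Str.len_eq, PySem.Str.isIn_iff_infix]
  constructor
  · rintro ⟨i, ⟨hi0, hilt⟩, j, ⟨hij, hjlt⟩, rfl⟩
    have ha : i = ((i.toNat : Nat) : Int) := by omega
    have hb : j = ((j.toNat : Nat) : Int) := by omega
    rw [PySem.Str.toList_slice]
    show PySem.List.slice x.toList (some i) (some j) <:+: x.toList
    rw [ha, hb, PySem.List.slice_natCast]
    exact ((List.take_prefix _ _).isInfix.trans (List.drop_suffix _ _).isInfix)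
  · intro h
    obtain ⟨s, t, hst⟩ := h
    have hlen : (s ++ l.toList ++ t).length = x.toList.length := by rw [hst]
    simp only [List.length_append] at hlen
    refine ⟨(s.length : Int), ⟨by omega, by omega⟩,
      ((s.length + l.toList.length : Nat) : Int), ⟨by omega, by omega⟩, ?_⟩
    rw [← String.toList_inj, PySem.Str.toList_slice]
    show PySem.List.slice x.toList (some ((s.length : Nat) : Int))
        (some ((s.length + l.toList.length : Nat) : Int)) = l.toList
    rw [PySem.List.slice_natCast, ← hst, Nat.add_sub_cancel_left,
        List.append_assoc, List.drop_left, List.take_left]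

-- the guarded-modify fold never changes which keys are present
theorem scatter_contains (t : Int) (ss : List String) (sz : PySem.Dict String Int) (k : String) :
    (ss.foldl (fun sz s => if sz.contains s then sz.modify s 0 (· + t) else sz) sz).contains k
      = sz.contains k := by
  induction ss generalizing sz with
  | nil => rfl
  | cons a rest ih =>
    simp only [List.foldl_cons]
    by_cases h : sz.contains a = true
    · rw [if_pos h, ih]
      rw [PySem.Dict.contains_modify]
      by_cases hk : k = a
      · subst hk; simp [h]
      · simp [hk]
    · rw [if_neg h, ih]

-- nor the key list
theorem scatter_keys (t : Int) (ss : List String) (sz : PySem.Dict String Int) :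
    (ss.foldl (fun sz s => if sz.contains s then sz.modify s 0 (· + t) else sz) sz).keys
      = sz.keys := by
  induction ss generalizing sz with
  | nil => rfl
  | cons a rest ih =>
    simp only [List.foldl_cons]
    by_cases h : sz.contains a = true
    · rw [if_pos h, ih, PySem.Dict.keys_modify, PySem.Dict.keys_insert_of_contains _ _ h]
    · rw [if_neg h, ih]

-- one scatter pass over a duplicate-free substring list adds t exactly once to a present key
theorem scatter_getD (t : Int) (ss : List String) (hnd : ss.Nodup)
    (sz : PySem.Dict String Int) (l : String) :
    (ss.foldl (fun sz s => if sz.contains s then sz.modify s 0 (· + t) else sz) sz).getD l 0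
      = sz.getD l 0 + (if sz.contains l = true ∧ l ∈ ss then t else 0) := by
  induction ss generalizing sz with
  | nil => simp
  | cons a rest ih =>
    have hnd' : rest.Nodup := hnd.of_cons
    simp only [List.foldl_cons]
    by_cases h : sz.contains a = true
    · rw [if_pos h, ih hnd']
      by_cases hl : l = a
      · subst hl
        have hnm : l ∉ rest := (List.nodup_cons.mp hnd).1
        rw [PySem.Dict.getD_modify_self]
        simp [PySem.Dict.contains_modify, h, hnm]
      · rw [PySem.Dict.getD_modify_of_ne _ _ _ hl]
        have hc : (sz.modify a 0 (· + t)).contains l = sz.contains l := by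
          rw [PySem.Dict.contains_modify]; simp [hl]
        rw [hc]
        simp [List.mem_cons, hl]
    · rw [if_neg h, ih hnd']
      by_cases hl : l = a
      · subst hl
        have hnm : l ∉ rest := (List.nodup_cons.mp hnd).1
        simp [h, hnm]
      · simp [List.mem_cons, hl]

-- the outer scatter loop, as the port's fold over the items
def pvOuter (ps : List (String × List (String × Int))) (sz : PySem.Dict String Int) :
    PySem.Dict String Int :=
  ps.foldl (fun sz p =>
      (PySem.List.dedup (pvSubsGen p.1)).foldl
        (fun sz s => if sz.contains s then sz.modify s 0 (· + (PySem.Dict.ofList p.2).values.sum) else sz)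
        sz) sz

theorem outer_keys (ps : List (String × List (String × Int))) (sz : PySem.Dict String Int) :
    (pvOuter ps sz).keys = sz.keys := by
  induction ps generalizing sz with
  | nil => rfl
  | cons p rest ih =>
    show (pvOuter rest _).keys = _
    rw [ih, scatter_keys]

-- the value the outer scatter loop leaves at a present key: the matching totals summed
theorem outer_getD (ps : List (String × List (String × Int))) (sz : PySem.Dict String Int)
    (l : String) (hl : sz.contains l = true) :
    (pvOuter ps sz).getD l 0
      = sz.getD l 0
        + ((ps.filter (fun p => PySem.Str.isIn l p.1)).map
            (fun p => (PySem.Dict.ofList p.2).values.sum)).sum := by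
  induction ps generalizing sz with
  | nil => simp [pvOuter]
  | cons p rest ih =>
    have hl' : ((PySem.List.dedup (pvSubsGen p.1)).foldl
        (fun sz s => if sz.contains s then sz.modify s 0 (· + (PySem.Dict.ofList p.2).values.sum) else sz)
        sz).contains l = true := by rw [scatter_contains]; exact hl
    show (pvOuter rest _).getD l 0 = _
    rw [ih _ hl', scatter_getD _ _ (PySem.List.nodup_dedup _) sz l]
    rw [List.filter_cons]
    by_cases hin : PySem.Str.isIn l p.1 = true
    · have hmem : l ∈ PySem.List.dedup (pvSubsGen p.1) := by
        rw [PySem.List.mem_dedup]; exact (mem_pvSubsGen p.1 l).mpr hin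
      rw [if_pos ⟨hl, hmem⟩, if_pos (by simpa using hin)]
      simp [add_assoc]
    · have hmem : l ∉ PySem.List.dedup (pvSubsGen p.1) := by
        rw [PySem.List.mem_dedup, mem_pvSubsGen]; exact hin
      rw [if_neg (by tauto), if_neg (by simpa using hin)]
      simp

-- the initial dict: every key of d, mapped to 0
theorem sizes0_items (ks : List String) (hnd : ks.Nodup) :
    (ks.foldl (fun sz l => sz.insert l (0 : Int)) PySem.Dict.empty).items
      = ks.map (fun k => (k, (0 : Int))) := by
  have hemp : (PySem.Dict.empty : PySem.Dict String Int).items = [] := rfl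
  have := PySem.Dict.items_foldl_insert_fresh ks (fun (x : String) => x)
      (fun _ => (0 : Int)) PySem.Dict.empty (by intro a _; simp)
      (by rw [List.map_id_fun']; exact hnd)
  rw [this, hemp, List.nil_append]

theorem total_dir_sizes_eq (fs : List (String × List (String × Int))) :
    total_dir_sizes fs = total_dir_sizes_alt fs := by
  have hnd := PySem.Dict.nodup_keys_ofList fs
  set d := PySem.Dict.ofList fs with hd
  set sizes0 := d.keys.foldl (fun sz l => sz.insert l (0 : Int)) PySem.Dict.empty with hs0
  -- facts about sizes0
  have hs0items : sizes0.items = d.keys.map (fun k => (k, (0 : Int))) := sizes0_items d.keys hnd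
  have hs0keys : sizes0.keys = d.keys := by
    show sizes0.items.map (·.1) = d.keys
    rw [hs0items, List.map_map]; exact List.map_id d.keys
  have hs0nd : sizes0.keys.Nodup := hs0keys ▸ hnd
  have hs0getD : ∀ l ∈ d.keys, sizes0.getD l 0 = 0 := by
    intro l hlk
    exact PySem.Dict.getD_of_mem_items sizes0
      (by rw [hs0items]; exact List.mem_map_of_mem hlk) hs0nd 0
  have hs0c : ∀ l ∈ d.keys, sizes0.contains l = true := by
    intro l hlk
    rw [PySem.Dict.contains_iff_mem_keys, hs0keys]; exact hlk
  -- B unfolded to the outer fold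
  have hB : total_dir_sizes_alt fs = (pvOuter d.items sizes0).items := rfl
  have hfk : (pvOuter d.items sizes0).keys = d.keys := by rw [outer_keys, hs0keys]
  have hfnd : (pvOuter d.items sizes0).keys.Nodup := hfk ▸ hnd
  rw [hB, PySem.Dict.items_eq_map_keys _ hfnd 0, hfk, A_as_map]
  refine List.map_congr_left ?_
  intro l hlk
  have hval := outer_getD d.items sizes0 l (hs0c l hlk)
  rw [hval, hs0getD l hlk, zero_add]
  -- A's per-key value
  have hA := keyTotal_eq d hnd l
  simp only at hA
  have hta : pvTA fs l
      = (((d.items.map (fun p => (p.1, (PySem.Dict.ofList p.2).values.sum))).filter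
            (fun q => PySem.Str.isIn l q.1)).map (·.2)).sum := by
    unfold pvTA
    simpa [← hd] using hA
  rw [Prod.mk.injEq]
  refine ⟨rfl, ?_⟩
  rw [hta, List.filter_map, List.map_map]
  rfl

-- ===== VERDICT (by name: the statement is the Claim_ definition above) =====
theorem total_dir_sizes_spec : Claim_equal_total_dir_sizes := by
  intro fs _
  show total_dir_sizes fs = total_dir_sizes_alt fs
  exact total_dir_sizes_eq fs
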